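-- pv_equiv track=rewrite | github.com/KirilTan/Programming-Fundamentals-with-Python-02-2023 | 08_text_processing/exercise/02_character_multiplier.py | string_multiplication
-- ===== SOURCE A (Python) =====
-- def string_multiplication(str1: str, str2: str) -> int:
--     """
--     This function returns the sum of the multiplied character codes of the two strings.
--     If one of the strings is longer than the other,
--     it adds the remaining character codes to the total sum without multiplication.
--     """
--     total_sum = 0
--
--     if len(str1) > len(str2):
--         for char in str1[len(str2):]:
--             total_sum += ord(char)
--
--     elif len(str1) < len(str2):
--         for char in str2[len(str1):]:
--             total_sum += ord(char)
--
--     for char1, char2 in zip(str1, str2):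
--         total_sum += ord(char1) * ord(char2)
--
--     return total_sum
-- ===== SOURCE B (Python) =====
-- def string_multiplication(str1: str, str2: str) -> int:
--     total = 0
--     for i in range(max(len(str1), len(str2))):
--         if i < len(str1) and i < len(str2):
--             total += ord(str1[i]) * ord(str2[i])
--         elif i < len(str1):
--             total += ord(str1[i])
--         else:
--             total += ord(str2[i])
--     return total
-- ===== Notes on version B (the rewrite author's own statement) =====
-- stated objective: simpler
-- what changed: Replaced A's three-part structure (length comparison, separate leftover-tail loop, then a zip loop) with a single index-driven pass over range(max(len1,len2)) that adds the product when both strings have a character at i and the lone character code otherwise.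
import Mathlib
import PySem

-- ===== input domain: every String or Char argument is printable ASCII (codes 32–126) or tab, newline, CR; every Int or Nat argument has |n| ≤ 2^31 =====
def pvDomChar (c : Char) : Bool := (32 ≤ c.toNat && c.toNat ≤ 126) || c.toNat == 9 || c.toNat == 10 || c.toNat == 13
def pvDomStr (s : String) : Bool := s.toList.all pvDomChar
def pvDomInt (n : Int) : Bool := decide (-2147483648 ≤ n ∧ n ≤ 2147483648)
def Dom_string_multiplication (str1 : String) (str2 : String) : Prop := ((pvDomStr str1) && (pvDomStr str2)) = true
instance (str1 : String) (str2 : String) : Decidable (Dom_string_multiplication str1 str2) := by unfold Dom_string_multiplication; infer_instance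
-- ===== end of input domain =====

-- B replaces A's three-part structure (length comparison + leftover-tail loop + zip loop) with a
-- single index-driven pass over range(max(len1,len2)); objective: simpler, same cost.


-- ===== PORT A =====
def string_multiplication (str1 : String) (str2 : String) : Int :=
  let l1 := str1.toList
  let l2 := str2.toList
  let total0 : Int := 0
  let total1 : Int :=
    if l1.length > l2.length then
      (PySem.List.slice l1 (some (l2.length : Int)) none).foldl
        (fun acc c => acc + (c.toNat : Int)) total0
    else if l1.length < l2.length then
      (PySem.List.slice l2 (some (l1.length : Int)) none).foldl
        (fun acc c => acc + (c.toNat : Int)) total0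
    else total0
  (l1.zip l2).foldl (fun acc cd => acc + (cd.1.toNat : Int) * (cd.2.toNat : Int)) total1

-- ===== PORT B =====
def string_multiplication_alt (str1 : String) (str2 : String) : Int :=
  let l1 := str1.toList
  let l2 := str2.toList
  (PySem.List.pyRange 0 (max (l1.length : Int) (l2.length : Int)) 1).foldl
    (fun total i =>
      if i < (l1.length : Int) ∧ i < (l2.length : Int) then
        total + ((PySem.List.pyGetD l1 i ' ').toNat : Int) * ((PySem.List.pyGetD l2 i ' ').toNat : Int)
      else if i < (l1.length : Int) then
        total + ((PySem.List.pyGetD l1 i ' ').toNat : Int)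
      else
        total + ((PySem.List.pyGetD l2 i ' ').toNat : Int))
    0

-- ===== PRECONDITION & SPEC =====
def Spec_string_multiplication (str1 : String) (str2 : String) (out : Int) : Prop := out = string_multiplication_alt str1 str2
instance (str1 : String) (str2 : String) (out : Int) : Decidable (Spec_string_multiplication str1 str2 out) := by unfold Spec_string_multiplication; infer_instance

-- ===== CLAIM (what is proved, stated in full; the proofs are below) =====
def Claim_equal_string_multiplication : Prop := ∀ (str1 : String) (str2 : String), Dom_string_multiplication str1 str2 → Spec_string_multiplication str1 str2 (string_multiplication str1 str2)

-- ===== LEMMAS AND PROOFS =====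

-- B's per-index summand, named so the fold body can be rewritten into 'acc + g i' form.
def pvG (l1 l2 : List Char) (i : Int) : Int :=
  if i < (l1.length : Int) ∧ i < (l2.length : Int) then
    ((PySem.List.pyGetD l1 i ' ').toNat : Int) * ((PySem.List.pyGetD l2 i ' ').toNat : Int)
  else if i < (l1.length : Int) then
    ((PySem.List.pyGetD l1 i ' ').toNat : Int)
  else
    ((PySem.List.pyGetD l2 i ' ').toNat : Int)

-- the paired prefix of B's pass is exactly A's zip-map
theorem pvG_prefix (l1 l2 : List Char) :
    (PySem.List.pyRange 0 ((min l1.length l2.length : Nat) : Int) 1).map (pvG l1 l2)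
      = (l1.zip l2).map (fun cd => ((cd.1.toNat : Int) * (cd.2.toNat : Int))) := by
  rw [PySem.List.pyRange_zero_natCast, List.map_map]
  apply List.ext_getElem
  · simp
  · intro i h1 h2
    simp only [List.getElem_map, List.getElem_range, Function.comp_apply, List.getElem_zip]
    have hi : i < min l1.length l2.length := by simpa using h1
    have hi1 : i < l1.length := by omega
    have hi2 : i < l2.length := by omega
    simp [pvG, PySem.List.pyGetD_natCast, List.getD_eq_getElem?_getD, hi1, hi2]

-- the leftover suffix of B's pass is the ord-map of the longer string's tail
theorem pvG_tail_left (l1 l2 : List Char) :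
    (PySem.List.pyRange ((l2.length : Nat) : Int) (l1.length : Int) 1).map (pvG l1 l2)
      = (l1.drop l2.length).map (fun c => (c.toNat : Int)) := by
  have hcong : ∀ i ∈ PySem.List.pyRange ((l2.length : Nat) : Int) (l1.length : Int) 1,
      pvG l1 l2 i = ((PySem.List.pyGetD l1 i ' ').toNat : Int) := by
    intro i hi
    rw [PySem.List.mem_pyRange_one] at hi
    simp only [pvG]
    rw [if_neg (by omega), if_pos (by omega)]
  rw [List.map_congr_left hcong]
  have := PySem.List.map_pyGetD_pyRange' l1 ' ' (a := (l2.length : Int)) (by positivity)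
  rw [show (fun i => ((PySem.List.pyGetD l1 i ' ').toNat : Int))
        = (fun c : Char => (c.toNat : Int)) ∘ (fun j => PySem.List.pyGetD l1 j ' ') from rfl,
      ← List.map_map, this]
  simp

theorem pvG_tail_right (l1 l2 : List Char) :
    (PySem.List.pyRange ((l1.length : Nat) : Int) (l2.length : Int) 1).map (pvG l1 l2)
      = (l2.drop l1.length).map (fun c => (c.toNat : Int)) := by
  have hcong : ∀ i ∈ PySem.List.pyRange ((l1.length : Nat) : Int) (l2.length : Int) 1,
      pvG l1 l2 i = ((PySem.List.pyGetD l2 i ' ').toNat : Int) := by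
    intro i hi
    rw [PySem.List.mem_pyRange_one] at hi
    simp only [pvG]
    rw [if_neg (by omega), if_neg (by omega)]
  rw [List.map_congr_left hcong]
  have := PySem.List.map_pyGetD_pyRange' l2 ' ' (a := (l1.length : Int)) (by positivity)
  rw [show (fun i => ((PySem.List.pyGetD l2 i ' ').toNat : Int))
        = (fun c : Char => (c.toNat : Int)) ∘ (fun j => PySem.List.pyGetD l2 j ' ') from rfl,
      ← List.map_map, this]
  simp

-- B's whole pass, as one sum split at min(len1, len2)
theorem alt_eq_sum (str1 str2 : String) :
    string_multiplication_alt str1 str2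
      = ((str1.toList.zip str2.toList).map (fun cd => ((cd.1.toNat : Int) * (cd.2.toNat : Int)))).sum
        + (if str2.toList.length ≤ str1.toList.length
             then ((str1.toList.drop str2.toList.length).map (fun c => (c.toNat : Int))).sum
             else ((str2.toList.drop str1.toList.length).map (fun c => (c.toNat : Int))).sum) := by
  set l1 := str1.toList
  set l2 := str2.toList
  have hbody : (fun (total : Int) (i : Int) =>
      if i < (l1.length : Int) ∧ i < (l2.length : Int) then
        total + ((PySem.List.pyGetD l1 i ' ').toNat : Int) * ((PySem.List.pyGetD l2 i ' ').toNat : Int)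
      else if i < (l1.length : Int) then
        total + ((PySem.List.pyGetD l1 i ' ').toNat : Int)
      else
        total + ((PySem.List.pyGetD l2 i ' ').toNat : Int))
      = fun total i => total + pvG l1 l2 i := by
    funext t i
    simp only [pvG]
    split_ifs <;> rfl
  show (PySem.List.pyRange 0 (max (l1.length : Int) (l2.length : Int)) 1).foldl _ 0 = _
  rw [hbody, PySem.List.foldl_add,
      PySem.List.pyRange_one_append 0 ((min l1.length l2.length : Nat) : Int)
        (max (l1.length : Int) (l2.length : Int)) (by positivity) (by omega),
      List.map_append, List.sum_append, pvG_prefix, zero_add]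
  by_cases h : l2.length ≤ l1.length
  · rw [if_pos h]
    have hmin : ((min l1.length l2.length : Nat) : Int) = ((l2.length : Nat) : Int) := by
      omega
    have hmax : max (l1.length : Int) (l2.length : Int) = (l1.length : Int) := by omega
    rw [hmin, hmax, pvG_tail_left l1 l2]
  · rw [if_neg h]
    have hmin : ((min l1.length l2.length : Nat) : Int) = ((l1.length : Nat) : Int) := by
      omega
    have hmax : max (l1.length : Int) (l2.length : Int) = (l2.length : Int) := by omega
    rw [hmin, hmax, pvG_tail_right l1 l2]

-- ===== VERDICT (by name: the statement is the Claim_ definition above) =====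
theorem string_multiplication_spec : Claim_equal_string_multiplication := by
  intro str1 str2 _
  unfold Spec_string_multiplication
  rw [alt_eq_sum]
  unfold string_multiplication
  set l1 := str1.toList
  set l2 := str2.toList
  simp only
  rw [PySem.List.foldl_add (l1.zip l2)]
  by_cases h1 : l1.length > l2.length
  · rw [if_pos h1, PySem.List.slice_from_natCast, PySem.List.foldl_add]
    rw [if_pos (by omega)]
    ring
  · rw [if_neg h1]
    by_cases h2 : l1.length < l2.length
    · rw [if_pos h2, PySem.List.slice_from_natCast, PySem.List.foldl_add]
      rw [if_neg (by omega)]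
      ring
    · rw [if_neg h2, if_pos (by omega)]
      have hd : l1.drop l2.length = [] := by
        apply List.drop_eq_nil_of_le; omega
      rw [hd]
      simp
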